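-- pv_equiv track=rewrite | github.com/h3d-hieuct/cad-draw | max_min.py | get_max_point
-- ===== SOURCE A (Python) =====
-- def get_max_point(points):
--     value_x = points[0][0]
--     value_y = points[0][1]
--     for point in points:
--         if value_x < point[0]:
--             value_x = point[0]
--         if value_y < point[1]:
--             value_y = point[1]
--     return value_x, value_y
-- ===== SOURCE B (Python) =====
-- def get_max_point(points):
--     xs, ys = zip(*points)
--     return max(xs), max(ys)
-- ===== Notes on version B (the rewrite author's own statement) =====
-- stated objective: simpler
-- what changed: Replaces the single interleaved loop updating two running maxima with a transpose (zip(*points)) followed by two independent column reductions with max().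
import Mathlib
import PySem

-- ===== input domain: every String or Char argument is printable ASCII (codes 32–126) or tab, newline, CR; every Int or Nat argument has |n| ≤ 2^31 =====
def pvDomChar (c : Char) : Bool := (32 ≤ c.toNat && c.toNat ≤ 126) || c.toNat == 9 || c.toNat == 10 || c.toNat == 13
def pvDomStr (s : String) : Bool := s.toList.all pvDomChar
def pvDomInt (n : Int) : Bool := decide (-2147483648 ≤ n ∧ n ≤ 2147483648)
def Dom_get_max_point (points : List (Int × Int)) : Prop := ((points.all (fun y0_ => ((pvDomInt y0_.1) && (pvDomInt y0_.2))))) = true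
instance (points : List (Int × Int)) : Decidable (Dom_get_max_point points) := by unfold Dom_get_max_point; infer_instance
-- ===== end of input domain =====

-- B replaces A's single interleaved loop by a transpose (unzip) followed by two
-- independent max-reductions (objective: simpler).

-- ===== PORT A =====
-- A: value_x/value_y start at points[0], then one loop over points updates both.
-- On [] Python raises IndexError (excluded by Pre_); the [] branch value is arbitrary.
def get_max_point (points : List (Int × Int)) : Int × Int :=
  match points with
  | [] => (0, 0)
  | p :: _ =>
    points.foldl
      (fun s q =>
        let vx := if s.1 < q.1 then q.1 else s.1
        let vy := if s.2 < q.2 then q.2 else s.2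
        (vx, vy))
      (p.1, p.2)

-- ===== PORT B =====
-- Python's max over a nonempty sequence: first element, then fold of binary max.
def pyMaxNE (h : Int) (t : List Int) : Int := t.foldl max h

-- B: zip(*points) = unzip into the two coordinate columns, then max of each column.
-- On [] Python's max raises ValueError (excluded by Pre_).
def get_max_point_alt (points : List (Int × Int)) : Int × Int :=
  let cols := points.unzip
  match cols.1, cols.2 with
  | x :: xs, y :: ys => (pyMaxNE x xs, pyMaxNE y ys)
  | _, _ => (0, 0)

-- ===== PRECONDITION & SPEC =====
-- A raises IndexError and B raises ValueError on the empty list; Pre_ excludes it.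
def Pre_get_max_point (points : List (Int × Int)) : Prop := points ≠ []
instance (points : List (Int × Int)) : Decidable (Pre_get_max_point points) := by
  unfold Pre_get_max_point; infer_instance
def pvWitness_get_max_point : (List (Int × Int)) := [(1, 2), (3, -1)]

def Spec_get_max_point (points : List (Int × Int)) (out : Int × Int) : Prop := out = get_max_point_alt points
instance (points : List (Int × Int)) (out : Int × Int) : Decidable (Spec_get_max_point points out) := by unfold Spec_get_max_point; infer_instance

-- ===== CLAIM (what is proved, stated in full; the proofs are below) =====
def Claim_equal_get_max_point : Prop := ∀ (points : List (Int × Int)), Dom_get_max_point points → Pre_get_max_point points → Spec_get_max_point points (get_max_point points)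

-- ===== LEMMAS AND PROOFS =====

-- A's paired fold equals the pair of B's two coordinate folds.
theorem foldl_pair_max (t : List (Int × Int)) (a b : Int) :
    t.foldl
      (fun s q =>
        let vx := if s.1 < q.1 then q.1 else s.1
        let vy := if s.2 < q.2 then q.2 else s.2
        (vx, vy))
      (a, b)
    = ((t.map Prod.fst).foldl max a, (t.map Prod.snd).foldl max b) := by
  induction t generalizing a b with
  | nil => rfl
  | cons q t ih =>
    simp only [List.foldl_cons, List.map_cons]
    rw [ih]
    congr 2 <;> (rw [max_def]; split_ifs <;> omega)

theorem get_max_point_spec : Claim_equal_get_max_point := by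
  intro points _ hpre
  unfold Spec_get_max_point get_max_point get_max_point_alt pyMaxNE
  match points with
  | [] => exact absurd rfl hpre
  | p :: t =>
    simp only [List.unzip_eq_map, List.map_cons, List.foldl_cons, foldl_pair_max]
    simp

-- ===== VERDICT (by name: the statement is the Claim_ definition above) =====
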